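-- pv_equiv track=rewrite | github.com/VincentFeng123/reelAI | backend/app/db.py | _adapt_query_for_postgres
-- ===== SOURCE A (Python) =====
-- def _adapt_query_for_postgres(query: str) -> str:
--     result: list[str] = []
--     i = 0
--     in_single_quote = False
--     in_double_quote = False
--     in_line_comment = False
--     in_block_comment = False
--     while i < len(query):
--         char = query[i]
--         nxt = query[i + 1] if i + 1 < len(query) else ""
--
--         if in_line_comment:
--             result.append(char)
--             if char == "\n":
--                 in_line_comment = False
--             i += 1
--             continue
--
--         if in_block_comment:
--             result.append(char)
--             if char == "*" and nxt == "/":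
--                 result.append(nxt)
--                 in_block_comment = False
--                 i += 2
--                 continue
--             i += 1
--             continue
--
--         if not in_single_quote and not in_double_quote:
--             if char == "-" and nxt == "-":
--                 result.append(char)
--                 result.append(nxt)
--                 in_line_comment = True
--                 i += 2
--                 continue
--             if char == "/" and nxt == "*":
--                 result.append(char)
--                 result.append(nxt)
--                 in_block_comment = True
--                 i += 2
--                 continue
--             if char == "?":
--                 result.append("%s")
--                 i += 1
--                 continue
--
--         result.append(char)
--         if char == "'" and not in_double_quote:
--             if in_single_quote and nxt == "'":
--                 result.append(nxt)
--                 i += 2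
--                 continue
--             in_single_quote = not in_single_quote
--         elif char == '"' and not in_single_quote:
--             in_double_quote = not in_double_quote
--         i += 1
--     return "".join(result)
-- ===== SOURCE B (Python) =====
-- # Tokenizer re-implementation: dispatch on the token that starts at i and consume
-- # the whole token (line comment, block comment, quoted string) with str.find,
-- # instead of A's per-character boolean-flag state machine.
--
-- def _end_of_line_comment(query: str, i: int) -> int:
--     j = query.find("\n", i)
--     return len(query) if j == -1 else j + 1
--
-- def _end_of_block_comment(query: str, i: int) -> int:
--     j = query.find("*/", i)
--     return len(query) if j == -1 else j + 2
--
-- def _end_of_single_quoted(query: str, i: int) -> int: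
--     # i points just past the opening quote; '' is an escaped quote
--     while True:
--         j = query.find("'", i)
--         if j == -1:
--             return len(query)
--         if query.startswith("''", j):
--             i = j + 2
--         else:
--             return j + 1
--
-- def _end_of_double_quoted(query: str, i: int) -> int:
--     j = query.find('"', i)
--     return len(query) if j == -1 else j + 1
--
-- def _adapt_query_for_postgres(query: str) -> str:
--     out = []
--     i = 0
--     n = len(query)
--     while i < n:
--         c = query[i]
--         if query.startswith("--", i):
--             j = _end_of_line_comment(query, i + 2)
--         elif query.startswith("/*", i):
--             j = _end_of_block_comment(query, i + 2)
--         elif c == "'":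
--             j = _end_of_single_quoted(query, i + 1)
--         elif c == '"':
--             j = _end_of_double_quoted(query, i + 1)
--         elif c == "?":
--             out.append("%s")
--             i += 1
--             continue
--         else:
--             out.append(c)
--             i += 1
--             continue
--         out.append(query[i:j])
--         i = j
--     return "".join(out)
-- ===== Notes on version B (the rewrite author's own statement) =====
-- stated objective: idiomatic
-- what changed: Replaced A's per-character scanner carrying four boolean state flags with a tokenizer that dispatches on the token starting at the current position (line comment, block comment, single/double-quoted string, '?') and consumes each whole token at once via str.find.
import Mathlib
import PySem

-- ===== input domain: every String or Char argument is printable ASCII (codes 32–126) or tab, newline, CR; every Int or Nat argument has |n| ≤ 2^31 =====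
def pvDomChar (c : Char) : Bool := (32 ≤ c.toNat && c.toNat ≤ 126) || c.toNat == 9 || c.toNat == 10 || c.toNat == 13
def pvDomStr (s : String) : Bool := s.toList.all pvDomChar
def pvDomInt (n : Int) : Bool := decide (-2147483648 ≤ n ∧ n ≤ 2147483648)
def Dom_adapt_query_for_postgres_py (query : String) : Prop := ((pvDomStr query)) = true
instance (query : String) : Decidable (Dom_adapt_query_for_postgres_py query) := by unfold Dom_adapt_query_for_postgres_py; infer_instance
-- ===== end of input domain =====

-- B replaces A's per-character boolean-flag state machine with a tokenizer that
-- consumes a whole comment/quoted-string token at a time (objective: idiomatic).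

-- ===== PORT A =====
-- Literal transliteration of A's while loop: recursion over the remaining
-- characters, carrying the four boolean flags; `rest.head?` is Python's `nxt`
-- and consuming `rest.tail` is `i += 2`.
def goA : List Char → Bool → Bool → Bool → Bool → List Char
  | [], _, _, _, _ => []
  | c :: rest, sq, dq, lc, bc =>
    if lc then
      c :: goA rest sq dq (if c = '\n' then false else lc) bc
    else if bc then
      if c = '*' ∧ rest.head? = some '/' then
        c :: '/' :: goA rest.tail sq dq lc false
      else
        c :: goA rest sq dq lc bc
    else if (¬sq ∧ ¬dq) ∧ c = '-' ∧ rest.head? = some '-' then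
      c :: '-' :: goA rest.tail sq dq true bc
    else if (¬sq ∧ ¬dq) ∧ c = '/' ∧ rest.head? = some '*' then
      c :: '*' :: goA rest.tail sq dq lc true
    else if (¬sq ∧ ¬dq) ∧ c = '?' then
      '%' :: 's' :: goA rest sq dq lc bc
    else if c = '\'' ∧ ¬dq then
      if sq ∧ rest.head? = some '\'' then
        c :: '\'' :: goA rest.tail sq dq lc bc
      else
        c :: goA rest (!sq) dq lc bc
    else if c = '"' ∧ ¬sq then
      c :: goA rest sq (!dq) lc bc
    else
      c :: goA rest sq dq lc bc
  termination_by xs _ _ _ _ => xs.length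
  decreasing_by all_goals (simp [List.length_tail]; try omega)

def adapt_query_for_postgres_py (query : String) : String :=
  String.ofList (goA query.toList false false false false)

-- ===== PORT B =====
-- B-side helpers: each consumes one whole token, returning (token, rest);
-- they transliterate Source B's find-based `_end_of_*` helpers.

-- rest of the line comment, up to and including '\n' (or to the end)
def lineChunk : List Char → List Char × List Char
  | [] => ([], [])
  | c :: rest =>
    if c = '\n' then ([c], rest)
    else let p := lineChunk rest; (c :: p.1, p.2)

-- rest of the block comment, up to and including "*/" (or to the end)
def blockChunk : List Char → List Char × List Char
  | [] => ([], [])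
  | c :: rest =>
    if c = '*' ∧ rest.head? = some '/' then ([c, '/'], rest.tail)
    else let p := blockChunk rest; (c :: p.1, p.2)
  termination_by xs => xs.length
  decreasing_by all_goals (simp [List.length_tail]; try omega)

-- rest of a single-quoted string; '' is an escaped quote
def singleChunk : List Char → List Char × List Char
  | [] => ([], [])
  | c :: rest =>
    if c = '\'' ∧ rest.head? = some '\'' then
      let p := singleChunk rest.tail; (c :: '\'' :: p.1, p.2)
    else if c = '\'' then ([c], rest)
    else let p := singleChunk rest; (c :: p.1, p.2)
  termination_by xs => xs.length
  decreasing_by all_goals (simp [List.length_tail]; try omega)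

-- rest of a double-quoted string, up to and including '"' (or to the end)
def doubleChunk : List Char → List Char × List Char
  | [] => ([], [])
  | c :: rest =>
    if c = '"' then ([c], rest)
    else let p := doubleChunk rest; (c :: p.1, p.2)

theorem lineChunk_len (xs : List Char) : (lineChunk xs).2.length ≤ xs.length := by
  induction xs with
  | nil => simp [lineChunk]
  | cons c rest ih => simp only [lineChunk]; split <;> simp <;> omega

theorem blockChunk_len (xs : List Char) : (blockChunk xs).2.length ≤ xs.length := by
  induction xs using blockChunk.induct with
  | case1 => simp [blockChunk]
  | case2 c rest h => simp [blockChunk, h, List.length_tail]; omega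
  | case3 c rest h ih => simp [blockChunk, h]; omega

theorem singleChunk_len (xs : List Char) : (singleChunk xs).2.length ≤ xs.length := by
  induction xs using singleChunk.induct with
  | case1 => simp [singleChunk]
  | case2 c rest h ih =>
      simp [singleChunk, h]
      have := List.length_tail (l := rest); omega
  | case3 rest h => simp at h; simp [singleChunk, h]
  | case4 c rest h h' ih => simp [singleChunk, h, h']; omega

theorem doubleChunk_len (xs : List Char) : (doubleChunk xs).2.length ≤ xs.length := by
  induction xs with
  | nil => simp [doubleChunk]
  | cons c rest ih => simp only [doubleChunk]; split <;> simp <;> omega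

-- B's main loop: dispatch on the token that starts here, consume it whole.
def goB : List Char → List Char
  | [] => []
  | c :: rest =>
    if c = '-' ∧ rest.head? = some '-' then
      c :: '-' :: (let p := lineChunk rest.tail; p.1 ++ goB p.2)
    else if c = '/' ∧ rest.head? = some '*' then
      c :: '*' :: (let p := blockChunk rest.tail; p.1 ++ goB p.2)
    else if c = '\'' then
      c :: (let p := singleChunk rest; p.1 ++ goB p.2)
    else if c = '"' then
      c :: (let p := doubleChunk rest; p.1 ++ goB p.2)
    else if c = '?' then
      '%' :: 's' :: goB rest
    else
      c :: goB rest
  termination_by xs => xs.length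
  decreasing_by
    all_goals simp
    · have := lineChunk_len (List.tail rest); have := List.length_tail (l := rest); omega
    · have := blockChunk_len (List.tail rest); have := List.length_tail (l := rest); omega
    · have := singleChunk_len rest; omega
    · have := doubleChunk_len rest; omega

def adapt_query_for_postgres_py_alt (query : String) : String :=
  String.ofList (goB query.toList)

-- ===== PRECONDITION & SPEC =====
def Spec_adapt_query_for_postgres_py (query : String) (out : String) : Prop := out = adapt_query_for_postgres_py_alt query
instance (query : String) (out : String) : Decidable (Spec_adapt_query_for_postgres_py query out) := by unfold Spec_adapt_query_for_postgres_py; infer_instance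

-- ===== CLAIM (what is proved, stated in full; the proofs are below) =====
def Claim_equal_adapt_query_for_postgres_py : Prop := ∀ (query : String), Dom_adapt_query_for_postgres_py query → Spec_adapt_query_for_postgres_py query (adapt_query_for_postgres_py query)

-- ===== LEMMAS AND PROOFS =====

-- A in line-comment state behaves like lineChunk followed by normal state.
theorem goA_line (xs : List Char) :
    goA xs false false true false
      = (lineChunk xs).1 ++ goA (lineChunk xs).2 false false false false := by
  induction xs with
  | nil => simp [goA, lineChunk]
  | cons c rest ih =>
      by_cases h : c = '\n' <;> simp [goA, lineChunk, h, ih]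

-- A in block-comment state behaves like blockChunk followed by normal state.
theorem goA_block (xs : List Char) :
    goA xs false false false true
      = (blockChunk xs).1 ++ goA (blockChunk xs).2 false false false false := by
  induction xs using blockChunk.induct with
  | case1 => simp [goA, blockChunk]
  | case2 c rest h => simp [goA, blockChunk, h]
  | case3 c rest h ih => simp [goA, blockChunk, h, ih]

-- A inside a single-quoted string behaves like singleChunk then normal state.
theorem goA_single (xs : List Char) :
    goA xs true false false false
      = (singleChunk xs).1 ++ goA (singleChunk xs).2 false false false false := by
  induction xs using singleChunk.induct with
  | case1 => simp [goA, singleChunk]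
  | case2 c rest h ih => simp [goA, singleChunk, h, ih]
  | case3 rest h => simp at h; simp [goA, singleChunk, h]
  | case4 c rest h h' ih => simp [goA, singleChunk, h, h', ih]

-- A inside a double-quoted string behaves like doubleChunk then normal state.
theorem goA_double (xs : List Char) :
    goA xs false true false false
      = (doubleChunk xs).1 ++ goA (doubleChunk xs).2 false false false false := by
  induction xs with
  | nil => simp [goA, doubleChunk]
  | cons c rest ih =>
      by_cases h : c = '"' <;> simp [goA, doubleChunk, h, ih]

theorem goA_eq_goB (xs : List Char) : goA xs false false false false = goB xs := by
  induction xs using goB.induct with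
  | case1 => simp [goA, goB]
  | case2 c rest h ih =>
      simp [goA, goB, h, goA_line, ih]
  | case3 c rest h1 h ih =>
      simp [goA, goB, h1, h, goA_block, ih]
  | case4 rest h1 h2 ih =>
      simp [goA, goB, goA_single, ih]
  | case5 rest h1 h2 h3 ih =>
      simp [goA, goB, goA_double, ih]
  | case6 rest h1 h2 h3 h4 ih =>
      simp [goA, goB, ih]
  | case7 c rest h1 h2 h3 h4 h5 ih =>
      simp [goA, goB, h1, h2, h3, h4, h5, ih]

-- ===== VERDICT (by name: the statement is the Claim_ definition above) =====
theorem adapt_query_for_postgres_py_spec : Claim_equal_adapt_query_for_postgres_py := by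
  intro query _
  unfold Spec_adapt_query_for_postgres_py adapt_query_for_postgres_py adapt_query_for_postgres_py_alt
  rw [goA_eq_goB]
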